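-- pv_equiv track=rewrite | github.com/BenUni/ChessGame | Chess_Game.py | twisted_colors_board
-- ===== SOURCE A (Python) =====
-- def twisted_colors_board(board):
--     '''
--     Creates the board background and inserts it to a board(list)
--     '''
--     twister = True
--     space1 = 0
--     space2 = 0
--     for x in range(0,64):
--         if space1 < 8:
--             if twister:
--                 board.append('White')
--                 twister = False
--             else:
--                 board.append('Brown')
--                 twister = True
--             space1 += 1
--         else:
--             if not twister:
--                 board.append('White')
--                 twister = True
--             else:
--                 board.append('Brown')
--                 twister = False
--             space2 += 1
--             if space2 == 8:
--                 space2 = 0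
--                 space1 = 0
--     if len(board) == 65:
--         board.pop(0)
--     else:
--         pass
--     return board
-- ===== SOURCE B (Python) =====
-- def twisted_colors_board(board):
--     '''
--     Creates the board background and inserts it to a board(list)
--     '''
--     board.extend('White' if (i // 8 + i % 8) % 2 == 0 else 'Brown'
--                  for i in range(64))
--     if len(board) == 65:
--         board.pop(0)
--     return board
-- ===== Notes on version B (the rewrite author's own statement) =====
-- stated objective: simpler
-- what changed: Replaces the twister/space1/space2 toggle state machine with a single extend whose color is a closed-form parity of the cell index (i//8 + i%8) % 2.
import Mathlib
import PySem

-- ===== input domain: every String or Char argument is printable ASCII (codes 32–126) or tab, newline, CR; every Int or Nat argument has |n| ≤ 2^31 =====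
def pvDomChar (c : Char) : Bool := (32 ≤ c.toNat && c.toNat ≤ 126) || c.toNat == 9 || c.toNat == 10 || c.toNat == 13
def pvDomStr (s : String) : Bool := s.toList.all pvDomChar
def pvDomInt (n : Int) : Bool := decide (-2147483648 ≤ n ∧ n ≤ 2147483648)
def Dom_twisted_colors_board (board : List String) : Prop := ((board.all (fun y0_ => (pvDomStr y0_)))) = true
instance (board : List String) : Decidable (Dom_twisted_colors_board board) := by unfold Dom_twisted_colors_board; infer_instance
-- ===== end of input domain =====

-- B replaces A's twister/space1/space2 toggle state machine with a closed-form index parity;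
-- both A and B mutate the Python argument in place (append/extend, pop) — the equivalence proved
-- here is about the returned list, and B performs the same mutations as A.

-- ===== PORT A =====
-- one iteration of A's for-loop body over the state (board, twister, space1, space2)
def pvStepA (st : List String × Bool × Int × Int) (_x : Int) : List String × Bool × Int × Int :=
  match st with
  | (board, twister, space1, space2) =>
    if space1 < 8 then
      if twister then (board ++ ["White"], false, space1 + 1, space2)
      else (board ++ ["Brown"], true, space1 + 1, space2)
    else
      let bt : List String × Bool :=
        if !twister then (board ++ ["White"], true) else (board ++ ["Brown"], false)
      let space2' := space2 + 1
      if space2' == 8 then (bt.1, bt.2, 0, 0) else (bt.1, bt.2, space1, space2')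

def twisted_colors_board (board : List String) : List String :=
  let st := (PySem.List.pyRange 0 64 1).foldl pvStepA (board, true, (0 : Int), (0 : Int))
  let board := st.1
  -- board.pop(0): exact as drop 1 here, since the guard guarantees length 65 > 0
  if board.length == 65 then board.drop 1 else board

-- ===== PORT B =====
def twisted_colors_board_alt (board : List String) : List String :=
  let board := board ++ (PySem.List.pyRange 0 64 1).map (fun i =>
    if PySem.Int.mod (PySem.Int.floordiv i 8 + PySem.Int.mod i 8) 2 == 0 then "White" else "Brown")
  if board.length == 65 then board.drop 1 else board

-- ===== PRECONDITION & SPEC =====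
def Spec_twisted_colors_board (board : List String) (out : List String) : Prop := out = twisted_colors_board_alt board
instance (board : List String) (out : List String) : Decidable (Spec_twisted_colors_board board out) := by unfold Spec_twisted_colors_board; infer_instance

-- ===== CLAIM =====
def Claim_equal_twisted_colors_board : Prop := ∀ (board : List String), Dom_twisted_colors_board board → Spec_twisted_colors_board board (twisted_colors_board board)

-- ===== LEMMAS AND PROOFS =====
-- Each loop iteration appends exactly one color; the appended color and the next state
-- do not depend on the board accumulated so far.
theorem pvStepA_append (b : List String) (t : Bool) (s1 s2 : Int) (x : Int) :
    pvStepA (b, t, s1, s2) x = (b ++ (pvStepA ([], t, s1, s2) x).1, (pvStepA ([], t, s1, s2) x).2) := by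
  simp only [pvStepA]
  split_ifs <;> simp

theorem pvFoldA_append (l : List Int) : ∀ (b : List String) (t : Bool) (s1 s2 : Int),
    (l.foldl pvStepA (b, t, s1, s2)).1 = b ++ (l.foldl pvStepA ([], t, s1, s2)).1 := by
  induction l with
  | nil => intro b t s1 s2; simp
  | cons x xs ih =>
    intro b t s1 s2
    simp only [List.foldl_cons]
    rw [pvStepA_append]
    obtain ⟨b', t', s1', s2'⟩ := pvStepA ([], t, s1, s2) x
    rw [ih, ih b']
    simp [List.append_assoc]

theorem pvPattern_eq :
    ((PySem.List.pyRange 0 64 1).foldl pvStepA (([] : List String), true, (0 : Int), (0 : Int))).1 =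
    (PySem.List.pyRange 0 64 1).map (fun i =>
      if PySem.Int.mod (PySem.Int.floordiv i 8 + PySem.Int.mod i 8) 2 == 0 then "White" else "Brown") := by
  decide

-- ===== VERDICT =====
theorem twisted_colors_board_spec : Claim_equal_twisted_colors_board := by
  intro board _
  unfold Spec_twisted_colors_board twisted_colors_board twisted_colors_board_alt
  simp only []
  rw [pvFoldA_append, pvPattern_eq]
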